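-- pv_equiv track=rewrite | github.com/jahirulislammolla/CodeFights | InterviewPractice/Trees_Basic/findProfession.py | findProfession
-- ===== SOURCE A (Python) =====
-- def findProfession(level, pos):
--     x=[]
--     c=0
--     l=level-1
--     while l>=0:
--         c+=(2**l)
--         l-=1
--     c+=pos
--     l=level
--     while l>0:
--         x.append(c)
--         c//=2
--         l-=1
--     m="E"
--     for i in x[::-1]:
--         if i%2==0:
--             if m=="E":
--                 m="E"
--             else:
--                 m="D"
--         else:
--             if m=="E":
--                 m="D"
--             else:
--                 m="E"
--     if m=="D":
--         return "Doctor"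
--     return "Engineer"
-- ===== SOURCE B (Python) =====
-- def findProfession(level, pos):
--     # Closed form: the visited node chain has index c = 2**level - 1 + pos;
--     # the answer depends only on the parity of the popcount of the low `level`
--     # bits of c, i.e. of (pos - 1) mod 2**level.
--     if level <= 0:
--         return "Engineer"
--     t = (pos - 1) % (1 << level)
--     return "Doctor" if t.bit_count() % 2 else "Engineer"
-- ===== Notes on version B (the rewrite author's own statement) =====
-- stated objective: faster
-- what changed: Replaces A's three loops (summing 2**l to build the node index, repeatedly halving it into a list, then a parity walk over the reversed list) by the closed form (pos-1) mod 2**level and a single popcount parity test.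
import Mathlib
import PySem

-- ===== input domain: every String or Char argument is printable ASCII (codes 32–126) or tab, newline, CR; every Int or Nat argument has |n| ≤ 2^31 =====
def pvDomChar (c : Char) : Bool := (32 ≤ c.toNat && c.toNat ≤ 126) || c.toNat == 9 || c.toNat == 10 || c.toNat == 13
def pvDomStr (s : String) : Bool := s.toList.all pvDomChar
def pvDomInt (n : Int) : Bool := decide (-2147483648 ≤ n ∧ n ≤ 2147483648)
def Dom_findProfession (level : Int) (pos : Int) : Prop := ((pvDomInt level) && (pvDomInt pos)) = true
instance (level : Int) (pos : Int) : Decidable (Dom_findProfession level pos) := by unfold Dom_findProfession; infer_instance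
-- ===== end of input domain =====

-- B replaces A's three O(level) loops by the closed form (pos-1) mod 2**level and one popcount parity test.

-- ===== PORT A =====
-- while l>=0: c += 2**l; l -= 1
def pvLoop1 (l : Int) (c : Int) : Int :=
  if _h : l ≥ 0 then pvLoop1 (l - 1) (c + 2 ^ l.toNat) else c
  termination_by (l + 1).toNat
  decreasing_by omega

-- while l>0: x.append(c); c //= 2; l -= 1
def pvLoop2 (l : Int) (c : Int) (x : List Int) : List Int :=
  if _h : l > 0 then pvLoop2 (l - 1) (PySem.Int.floordiv c 2) (x ++ [c]) else x
  termination_by l.toNat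
  decreasing_by omega

-- body of the for-loop over x[::-1]
def pvStep (m : String) (i : Int) : String :=
  if PySem.Int.mod i 2 == 0 then (if m == "E" then "E" else "D")
  else (if m == "E" then "D" else "E")

def findProfession (level : Int) (pos : Int) : String :=
  let c := pvLoop1 (level - 1) 0
  let c := c + pos
  let x := pvLoop2 level c []
  let m := x.reverse.foldl pvStep "E"      -- x[::-1]
  if m == "D" then "Doctor" else "Engineer"

-- ===== PORT B =====
def findProfession_alt (level : Int) (pos : Int) : String :=
  if level ≤ 0 then "Engineer"
  else
    let t := PySem.Int.mod (pos - 1) ((1 : Int) <<< level.toNat)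
    if PySem.Int.bitCount t % 2 ≠ 0 then "Doctor" else "Engineer"

-- ===== PRECONDITION & SPEC =====
def Spec_findProfession (level : Int) (pos : Int) (out : String) : Prop := out = findProfession_alt level pos
instance (level : Int) (pos : Int) (out : String) : Decidable (Spec_findProfession level pos out) := by unfold Spec_findProfession; infer_instance

-- ===== CLAIM (what is proved, stated in full; the proofs are below) =====
def Claim_equal_findProfession : Prop := ∀ (level : Int) (pos : Int), Dom_findProfession level pos → Spec_findProfession level pos (findProfession level pos)

-- ===== LEMMAS AND PROOFS =====

-- the list built by A's second loop
def pvChain (c : Int) : Nat → List Int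
  | 0 => []
  | n + 1 => c :: pvChain (PySem.Int.floordiv c 2) n

-- boolean toggle mirroring pvStep's effect on {"E","D"}
def pvToggle (b : Bool) (i : Int) : Bool :=
  if PySem.Int.mod i 2 == 0 then b else !b

lemma pvLoop1_eq (n : Nat) : ∀ l c : Int, l + 1 = (n : Int) → pvLoop1 l c = c + 2 ^ n - 1 := by
  induction n with
  | zero => intro l c h; rw [pvLoop1]; simp [show ¬ l ≥ 0 by omega]
  | succ k ih =>
      intro l c h
      rw [pvLoop1]
      have hl : l ≥ 0 := by omega
      have hln : l.toNat = k := by omega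
      simp only [hl, dif_pos, hln]
      rw [ih (l - 1) (c + 2 ^ k) (by omega)]
      ring

lemma pvLoop2_eq (n : Nat) : ∀ (l c : Int) (x : List Int), l = (n : Int) →
    pvLoop2 l c x = x ++ pvChain c n := by
  induction n with
  | zero => intro l c x h; rw [pvLoop2]; simp [show ¬ l > 0 by omega, pvChain]
  | succ k ih =>
      intro l c x h
      rw [pvLoop2]
      have hl : l > 0 := by omega
      simp only [hl, dif_pos]
      rw [ih (l - 1) _ _ (by omega)]
      simp [pvChain]

lemma pvStep_toggle : ∀ (b : Bool) (i : Int),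
    pvStep (if b then "D" else "E") i = (if pvToggle b i then "D" else "E") := by
  intro b i
  by_cases h : PySem.Int.mod i 2 == 0 <;> cases b <;>
    simp only [pvStep, pvToggle, h, if_true, Bool.not_true, Bool.not_false] <;> rfl

lemma pvFold_step (xs : List Int) : ∀ b : Bool,
    xs.foldl pvStep (if b then "D" else "E") = (if xs.foldl pvToggle b then "D" else "E") := by
  induction xs with
  | nil => intro b; simp
  | cons x xs ih => intro b; rw [List.foldl_cons, List.foldl_cons, pvStep_toggle, ih]

lemma pvToggle_comm (b : Bool) (x y : Int) :
    pvToggle (pvToggle b x) y = pvToggle (pvToggle b y) x := by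
  unfold pvToggle
  by_cases hx : PySem.Int.mod x 2 == 0 <;> by_cases hy : PySem.Int.mod y 2 == 0 <;>
    simp only [hx, hy, if_true]

lemma pvFold_toggle_out (xs : List Int) : ∀ (b : Bool) (x : Int),
    pvToggle (xs.foldl pvToggle b) x = xs.foldl pvToggle (pvToggle b x) := by
  induction xs with
  | nil => intro b x; rfl
  | cons y ys ih => intro b x; simp only [List.foldl_cons, ih, pvToggle_comm]

lemma pvFold_toggle_reverse (xs : List Int) : ∀ b : Bool,
    xs.reverse.foldl pvToggle b = xs.foldl pvToggle b := by
  induction xs with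
  | nil => intro b; rfl
  | cons x xs ih =>
      intro b
      simp only [List.reverse_cons, List.foldl_append, List.foldl_cons, List.foldl_nil, ih,
        pvFold_toggle_out]

lemma pv_one_shiftLeft (n : Nat) : (1 : Int) <<< n = 2 ^ n := by
  rw [Int.shiftLeft_eq]; ring

-- low bit of c agrees with the low bit of c mod 2k
lemma pv_mod_low (c k : Int) : c % 2 = (c % (2 * k)) % 2 :=
  (Int.emod_emod_of_dvd c ⟨k, rfl⟩).symm

-- the higher bits of c mod 2k are (c // 2) mod k
lemma pv_mod_high (c k : Int) (hk : 0 < k) : (c / 2) % k = (c % (2 * k)) / 2 := by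
  have hR0 : 0 ≤ c % (2 * k) := Int.emod_nonneg c (by omega)
  have hR1 : c % (2 * k) < 2 * k := Int.emod_lt_of_pos c (by omega)
  have hc : c = c % (2 * k) + k * (c / (2 * k)) * 2 := by
    have h := Int.mul_ediv_add_emod c (2 * k); linear_combination -h
  conv_lhs => rw [hc]
  rw [Int.add_mul_ediv_right _ _ (by omega : (2 : Int) ≠ 0),
    Int.add_mul_emod_self_left]
  exact Int.emod_eq_of_lt (by omega) (by omega)

lemma pvChain_par (n : Nat) : ∀ (c : Int) (b : Bool),
    (pvChain c n).foldl pvToggle b =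
      xor b (decide (PySem.Int.bitCount (PySem.Int.mod c (2 ^ n)) % 2 = 1)) := by
  induction n with
  | zero =>
      intro c b
      rw [(PySem.Int.mod_eq_zero_iff_dvd c (2 ^ 0)).2 (by simp)]
      simp [pvChain, PySem.Int.bitCount_zero]
  | succ k ih =>
      intro c b
      have hk : (0 : Int) < 2 ^ k := by positivity
      have hpow : (0 : Int) < 2 ^ (k + 1) := by positivity
      set t : Int := PySem.Int.mod c (2 ^ (k + 1)) with htdef
      have htemod : t = c % (2 ^ (k + 1)) := by
        rw [htdef, PySem.Int.mod_eq_emod_of_pos hpow]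
      have ht0 : 0 ≤ t := htdef ▸ PySem.Int.mod_nonneg c hpow
      have hlow : PySem.Int.mod c 2 = t % 2 := by
        rw [PySem.Int.mod_eq_emod_of_pos (by omega : (0:Int) < 2), htemod,
          show (2 : Int) ^ (k + 1) = 2 * 2 ^ k by ring]
        exact pv_mod_low c (2 ^ k)
      have hhigh : PySem.Int.mod (PySem.Int.floordiv c 2) (2 ^ k) = t / 2 := by
        rw [PySem.Int.mod_eq_emod_of_pos hk, PySem.Int.floordiv_eq_ediv_of_pos
          (by omega : (0:Int) < 2), htemod, show (2 : Int) ^ (k + 1) = 2 * 2 ^ k by ring]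
        exact pv_mod_high c (2 ^ k) hk
      have hbc : PySem.Int.bitCount t = (t % 2).toNat + PySem.Int.bitCount (t / 2) := by
        rcases eq_or_lt_of_le ht0 with h0 | hpos
        · rw [← h0]; simp [PySem.Int.bitCount_zero]
        · rw [PySem.Int.bitCount_of_pos hpos, PySem.Int.mod_eq_emod_of_pos (by omega : (0:Int) < 2),
            PySem.Int.floordiv_eq_ediv_of_pos (by omega : (0:Int) < 2)]
      have hmod2 : t % 2 = 0 ∨ t % 2 = 1 := by omega
      simp only [pvChain, List.foldl_cons, pvToggle, hlow, ih, hhigh]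
      rcases hmod2 with h2 | h2
      · have hbceq : PySem.Int.bitCount t = PySem.Int.bitCount (t / 2) := by omega
        simp [h2, hbceq]
      · have hodd : PySem.Int.bitCount t = 1 + PySem.Int.bitCount (t / 2) := by omega
        by_cases hp : PySem.Int.bitCount (t / 2) % 2 = 1
        · have h1 : ¬ (PySem.Int.bitCount t % 2 = 1) := by omega
          simp [h2, hp, h1]
        · have h1 : PySem.Int.bitCount t % 2 = 1 := by omega
          simp [h2, hp, h1]

-- ===== VERDICT (by name: the statement is the Claim_ definition above) =====
theorem findProfession_spec : Claim_equal_findProfession := by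
  intro level pos _hdom
  unfold Spec_findProfession findProfession findProfession_alt
  dsimp only
  by_cases hle : level ≤ 0
  · rw [pvLoop2, dif_neg (by omega : ¬ level > 0)]
    simp [hle]
  · have hlt : 0 < level := by omega
    set L : Nat := level.toNat with hL
    have hc : pvLoop1 (level - 1) 0 = 2 ^ L - 1 := by
      have := pvLoop1_eq L (level - 1) 0 (by omega)
      omega
    rw [hc, pvLoop2_eq L level _ [] (by omega), List.nil_append]
    have hfold := pvFold_step ((pvChain (2 ^ L - 1 + pos) L).reverse) false
    rw [show (if (false : Bool) then "D" else "E") = "E" from rfl] at hfold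
    rw [hfold, pvFold_toggle_reverse, pvChain_par L (2 ^ L - 1 + pos) false]
    have hmodeq : PySem.Int.mod (2 ^ L - 1 + pos) (2 ^ L) =
        PySem.Int.mod (pos - 1) ((1 : Int) <<< L) := by
      rw [pv_one_shiftLeft, PySem.Int.mod_eq_emod_of_pos (by positivity : (0:Int) < 2 ^ L),
        PySem.Int.mod_eq_emod_of_pos (by positivity : (0:Int) < 2 ^ L),
        show (2 : Int) ^ L - 1 + pos = (pos - 1) + 2 ^ L * 1 by ring, Int.add_mul_emod_self_left]
    rw [hmodeq]
    set B := PySem.Int.bitCount (PySem.Int.mod (pos - 1) ((1 : Int) <<< L))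
    by_cases hp : B % 2 = 1
    · simp [hp, if_neg (by omega : ¬ level ≤ 0)]
    · simp [hp, (by omega : ¬ level ≤ 0)]
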